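-- pv_equiv track=rewrite | github.com/JMboy713/Coding-test | programmers/LV.2/n^2배열자르기.py | solution
-- ===== SOURCE A (Python) =====
-- def solution(n, left, right):
-- 	arr=[]
-- 	for i in range(left,right+1):
-- 		num=(i%n)+1
-- 		if num==0:
-- 			num=n
-- 		elif num<(i//n)+1:
-- 			num=(i//n)+1
-- 		arr.append(num)
--
-- 	return arr
-- ===== SOURCE B (Python) =====
-- # Row-wise re-implementation: iterate grid rows, clamp each row's flat-index
-- # span to [left, right], and emit max(row, col)+1 without per-element // and %.
-- def solution(n, left, right):
--     arr = []
--     for row in range(left // n, right // n + 1):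
--         lo = max(left, row * n)
--         hi = min(right, row * n + n - 1)
--         for i in range(lo, hi + 1):
--             arr.append(max(row, i - row * n) + 1)
--     return arr
-- ===== Notes on version B (the rewrite author's own statement) =====
-- stated objective: alternative
-- what changed: Replaces A's single flat pass that computes i%n and i//n for every index with a nested row/column decomposition: B walks the grid rows left//n..right//n, clamps each row's flat span to [left,right], and emits max(row,col)+1 from the row number and local column, with no per-element division; A's dead num==0 branch disappears.
-- outside the precondition, e.g. on solution(0, 0, 3): A raises ZeroDivisionError, B raises ZeroDivisionError; on solution(-2, 0, 3): A returns [1, -2, 1, -2], B returns []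
import Mathlib
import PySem

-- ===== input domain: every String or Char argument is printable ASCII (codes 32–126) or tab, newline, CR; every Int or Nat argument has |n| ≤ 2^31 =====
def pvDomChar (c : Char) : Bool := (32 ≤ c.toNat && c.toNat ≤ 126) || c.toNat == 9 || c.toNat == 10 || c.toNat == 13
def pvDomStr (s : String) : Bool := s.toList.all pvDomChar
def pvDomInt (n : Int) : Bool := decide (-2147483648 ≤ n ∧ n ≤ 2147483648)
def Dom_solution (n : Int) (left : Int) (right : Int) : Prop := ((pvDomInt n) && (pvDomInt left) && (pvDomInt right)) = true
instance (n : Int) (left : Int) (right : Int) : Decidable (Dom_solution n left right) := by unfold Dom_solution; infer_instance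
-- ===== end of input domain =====

-- B replaces A's single flat pass (per-element i%n and i//n) with a nested
-- row/column decomposition clamped to [left, right]; objective: alternative.

-- ===== PORT A =====
def solution (n : Int) (left : Int) (right : Int) : List Int :=
  (PySem.List.pyRange left (right + 1) 1).foldl
    (fun arr i =>
      let num := PySem.Int.mod i n + 1
      let num := if num = 0 then n
                 else if num < PySem.Int.floordiv i n + 1 then PySem.Int.floordiv i n + 1
                 else num
      arr ++ [num])
    []

-- ===== PORT B =====
def solution_alt (n : Int) (left : Int) (right : Int) : List Int :=
  (PySem.List.pyRange (PySem.Int.floordiv left n) (PySem.Int.floordiv right n + 1) 1).foldl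
    (fun arr row =>
      let lo := max left (row * n)
      let hi := min right (row * n + n - 1)
      (PySem.List.pyRange lo (hi + 1) 1).foldl (fun arr i => arr ++ [max row (i - row * n) + 1]) arr)
    []

-- ===== PRECONDITION & SPEC =====
-- Pre_ excludes n = 0, where A raises ZeroDivisionError, and n < 0, outside the
-- natural grid-size domain, where A's values are floor-division artefacts.
def Pre_solution (n : Int) (left : Int) (right : Int) : Prop := 1 ≤ n
instance (n : Int) (left : Int) (right : Int) : Decidable (Pre_solution n left right) := by unfold Pre_solution; infer_instance
def pvWitness_solution : Int × Int × Int := (3, 2, 5)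

def Spec_solution (n : Int) (left : Int) (right : Int) (out : List Int) : Prop := out = solution_alt n left right
instance (n : Int) (left : Int) (right : Int) (out : List Int) : Decidable (Spec_solution n left right out) := by unfold Spec_solution; infer_instance

-- ===== CLAIM (what is proved, stated in full; the proofs are below) =====
def Claim_equal_solution : Prop := ∀ (n : Int) (left : Int) (right : Int), Dom_solution n left right → Pre_solution n left right → Spec_solution n left right (solution n left right)

-- ===== LEMMAS AND PROOFS =====

-- the value of flat cell i in the n×n grid, as both programs compute it
def pvCell (n i : Int) : Int := max (PySem.Int.mod i n) (PySem.Int.floordiv i n) + 1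

lemma pvDivMod (n i q : Int) (hn : 0 < n) (h1 : q * n ≤ i) (h2 : i < (q + 1) * n) :
    PySem.Int.floordiv i n = q ∧ PySem.Int.mod i n = i - q * n := by
  have hd : PySem.Int.floordiv i n = q := by
    rw [PySem.Int.floordiv_eq_iff_of_pos hn]; exact ⟨h1, h2⟩
  refine ⟨hd, ?_⟩
  have := PySem.Int.floordiv_mul_add_mod i n
  rw [hd] at this; omega

lemma pvA_map (n left right : Int) (hn : 1 ≤ n) :
    solution n left right = (PySem.List.pyRange left (right + 1) 1).map (pvCell n) := by
  unfold solution
  rw [PySem.List.foldl_append_singleton_eq_map]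
  simp only [List.nil_append]
  refine List.map_congr_left (fun i _ => ?_)
  have h1 := PySem.Int.mod_nonneg i (show (0:Int) < n by omega)
  simp only [pvCell]
  split_ifs <;> omega

lemma pvB_rows (n b : Int) (hn : 1 ≤ n) : ∀ (k : Nat) (a : Int),
    (PySem.Int.floordiv b n + 1 - PySem.Int.floordiv a n).toNat = k →
    (PySem.List.pyRange (PySem.Int.floordiv a n) (PySem.Int.floordiv b n + 1) 1).flatMap
      (fun row => (PySem.List.pyRange (max a (row * n)) (min b (row * n + n - 1) + 1) 1).map
        (fun i => max row (i - row * n) + 1))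
    = (PySem.List.pyRange a (b + 1) 1).map (pvCell n) := by
  have hn0 : (0:Int) < n := by omega
  intro k
  induction k with
  | zero =>
    intro a hk
    set qa := PySem.Int.floordiv a n with hqa
    set qb := PySem.Int.floordiv b n with hqb
    have hle : qb + 1 ≤ qa := by omega
    have ha := (PySem.Int.floordiv_eq_iff_of_pos hn0 (a := a) (q := qa)).mp hqa.symm
    have hb := (PySem.Int.floordiv_eq_iff_of_pos hn0 (a := b) (q := qb)).mp hqb.symm
    -- a > b, so the flat range is empty too
    have hba : b < a := by
      have h1 : (qb + 1) * n ≤ qa * n := mul_le_mul_of_nonneg_right hle (by omega)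
      calc b < (qb + 1) * n := hb.2
        _ ≤ qa * n := h1
        _ ≤ a := ha.1
    rw [PySem.List.pyRange_one_eq_nil hle, PySem.List.pyRange_one_eq_nil (by omega)]
    simp
  | succ k ih =>
    intro a hk
    set qa := PySem.Int.floordiv a n with hqa
    set qb := PySem.Int.floordiv b n with hqb
    have hle : qa ≤ qb := by omega
    have ha := (PySem.Int.floordiv_eq_iff_of_pos hn0 (a := a) (q := qa)).mp hqa.symm
    have hb := (PySem.Int.floordiv_eq_iff_of_pos hn0 (a := b) (q := qb)).mp hqb.symm
    rw [PySem.List.pyRange_one_cons (by omega : qa < qb + 1)]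
    rw [List.flatMap_cons]
    have hmaxa : max a (qa * n) = a := by omega
    by_cases hbrow : b ≤ qa * n + n - 1
    · -- last row: the whole remaining span lies in row qa
      have hqaqb : qb = qa := by
        have h1 : qb * n ≤ qa * n := by
          by_contra hcon
          have : qa + 1 ≤ qb := by
            rcases lt_or_ge qa qb with h | h
            · omega
            · have : qb * n ≤ qa * n := mul_le_mul_of_nonneg_right h (by omega); omega
          have h2 : (qa + 1) * n ≤ qb * n := mul_le_mul_of_nonneg_right this (by omega)
          have : qa * n + n ≤ b := by
            have := hb.1; nlinarith
          omega
        have h2 : qa ≤ qb := hle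
        have h3 : qa * n ≤ qb * n := mul_le_mul_of_nonneg_right h2 (by omega)
        have h4 : qb * n = qa * n := le_antisymm h1 h3
        nlinarith [h4, mul_le_mul_of_nonneg_right (show qa + 1 ≤ qb + 1 by omega) (show (0:Int) ≤ n by omega)]
      have hmin : min b (qa * n + n - 1) = b := by omega
      rw [hqaqb, PySem.List.pyRange_one_eq_nil (by omega : qa + 1 ≤ qa + 1)]
      rw [hmaxa, hmin]
      simp only [List.flatMap_nil, List.append_nil]
      refine List.map_congr_left (fun i hi => ?_)
      rw [PySem.List.mem_pyRange_one] at hi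
      obtain ⟨hdm1, hdm2⟩ := pvDivMod n i qa hn0 (by omega) (by nlinarith [hi.2, hbrow])
      simp only [pvCell, hdm1, hdm2]
      omega
    · -- row qa is full up to qa*n+n-1; recurse from a' = (qa+1)*n
      have hmin : min b (qa * n + n - 1) = qa * n + n - 1 := by omega
      have ha' : PySem.Int.floordiv ((qa + 1) * n) n = qa + 1 := by
        rw [PySem.Int.floordiv_eq_iff_of_pos hn0]
        constructor
        · exact le_refl _
        · nlinarith
      have hih := ih ((qa + 1) * n) (by rw [ha']; omega)
      rw [ha'] at hih
      have hcong :
          (PySem.List.pyRange (qa + 1) (qb + 1) 1).flatMap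
            (fun row => (PySem.List.pyRange (max a (row * n)) (min b (row * n + n - 1) + 1) 1).map
              (fun i => max row (i - row * n) + 1))
          = (PySem.List.pyRange (qa + 1) (qb + 1) 1).flatMap
            (fun row => (PySem.List.pyRange (max ((qa + 1) * n) (row * n)) (min b (row * n + n - 1) + 1) 1).map
              (fun i => max row (i - row * n) + 1)) := by
        simp only [List.flatMap]
        congr 1
        refine List.map_congr_left (fun row hrow => ?_)
        rw [PySem.List.mem_pyRange_one] at hrow
        have h1 : (qa + 1) * n ≤ row * n := mul_le_mul_of_nonneg_right hrow.1 (by omega)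
        have h2 : a ≤ row * n := by
          have := ha.2; omega
        rw [max_eq_right h2, max_eq_right (le_refl _ |>.trans h1)]
      rw [hcong, hih]
      have hsplit : PySem.List.pyRange a (b + 1) 1
          = PySem.List.pyRange a ((qa + 1) * n) 1 ++ PySem.List.pyRange ((qa + 1) * n) (b + 1) 1 := by
        have hx : (qa + 1) * n = qa * n + n := by ring
        exact PySem.List.pyRange_one_append a ((qa + 1) * n) (b + 1) (by omega) (by omega)
      rw [hsplit, List.map_append]
      congr 1
      have : qa * n + n - 1 + 1 = (qa + 1) * n := by ring
      rw [hmaxa, hmin, this]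
      refine List.map_congr_left (fun i hi => ?_)
      rw [PySem.List.mem_pyRange_one] at hi
      obtain ⟨hdm1, hdm2⟩ := pvDivMod n i qa hn0 (by omega) (by omega)
      simp only [pvCell, hdm1, hdm2]
      omega

lemma pvFoldlCongr {α β : Type} (l : List β) (f g : α → β → α)
    (h : ∀ acc x, f acc x = g acc x) : ∀ init, l.foldl f init = l.foldl g init := by
  induction l with
  | nil => intro init; rfl
  | cons x xs ih => intro init; simp only [List.foldl_cons, h]; exact ih _

lemma pvB_map (n left right : Int) (hn : 1 ≤ n) :
    solution_alt n left right = (PySem.List.pyRange left (right + 1) 1).map (pvCell n) := by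
  unfold solution_alt
  simp only
  have hinner : ∀ (row : Int) (arr : List Int),
      (PySem.List.pyRange (max left (row * n)) (min right (row * n + n - 1) + 1) 1).foldl
        (fun arr i => arr ++ [max row (i - row * n) + 1]) arr
      = arr ++ (PySem.List.pyRange (max left (row * n)) (min right (row * n + n - 1) + 1) 1).map
          (fun i => max row (i - row * n) + 1) := by
    intro row arr; exact PySem.List.foldl_append_singleton_eq_map _ _ _
  calc (PySem.List.pyRange (PySem.Int.floordiv left n) (PySem.Int.floordiv right n + 1) 1).foldl
        (fun arr row =>
          (PySem.List.pyRange (max left (row * n)) (min right (row * n + n - 1) + 1) 1).foldl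
            (fun arr i => arr ++ [max row (i - row * n) + 1]) arr) []
      = (PySem.List.pyRange (PySem.Int.floordiv left n) (PySem.Int.floordiv right n + 1) 1).foldl
        (fun arr row => arr ++ (PySem.List.pyRange (max left (row * n)) (min right (row * n + n - 1) + 1) 1).map
            (fun i => max row (i - row * n) + 1)) [] := by
        exact pvFoldlCongr _ _ _ (fun arr row => hinner row arr) []
    _ = [] ++ (PySem.List.pyRange (PySem.Int.floordiv left n) (PySem.Int.floordiv right n + 1) 1).flatMap
        (fun row => (PySem.List.pyRange (max left (row * n)) (min right (row * n + n - 1) + 1) 1).map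
            (fun i => max row (i - row * n) + 1)) := PySem.List.foldl_append_eq_flatMap _ _ _
    _ = (PySem.List.pyRange left (right + 1) 1).map (pvCell n) := by
        rw [List.nil_append]
        exact pvB_rows n right hn _ left rfl

-- ===== VERDICT (by name: the statement is the Claim_ definition above) =====
theorem solution_spec : Claim_equal_solution := by
  intro n left right _ hpre
  unfold Spec_solution
  rw [pvA_map n left right hpre, pvB_map n left right hpre]
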